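-- pv_equiv track=rewrite | github.com/yosu/nand2tetris | 06/assembler.py | parse_c_command
-- ===== SOURCE A (Python) =====
-- from typing import Optional, Tuple
--
-- def parse_c_command(cmd: str) -> Tuple[Optional[str], str, Optional[str]]:
--     word = ''
--     for i, c in enumerate(cmd):
--         # omit `=' if dest is empty
--         if c == ';':
--             return None, word, cmd[i+1:]
--
--         # omit `;' if jump is empty
--         if c == '=':
--             return word, cmd[i+1:], None
--
--         word += c
--
--     raise ValueError(f'Error: can not parse {cmd}')
-- ===== SOURCE B (Python) =====
-- from typing import Optional, Tuple
--
-- def parse_c_command(cmd: str) -> Tuple[Optional[str], str, Optional[str]]: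
--     sc = cmd.find(';')
--     eq = cmd.find('=')
--     if sc != -1 and (eq == -1 or sc < eq):
--         return None, cmd[:sc], cmd[sc+1:]
--     if eq != -1:
--         return cmd[:eq], cmd[eq+1:], None
--     raise ValueError(f'Error: can not parse {cmd}')
-- ===== Notes on version B (the rewrite author's own statement) =====
-- stated objective: idiomatic
-- what changed: Replaces the manual enumerate loop with a word accumulator by two up-front str.find calls plus slicing, choosing the earlier delimiter.
import Mathlib
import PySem

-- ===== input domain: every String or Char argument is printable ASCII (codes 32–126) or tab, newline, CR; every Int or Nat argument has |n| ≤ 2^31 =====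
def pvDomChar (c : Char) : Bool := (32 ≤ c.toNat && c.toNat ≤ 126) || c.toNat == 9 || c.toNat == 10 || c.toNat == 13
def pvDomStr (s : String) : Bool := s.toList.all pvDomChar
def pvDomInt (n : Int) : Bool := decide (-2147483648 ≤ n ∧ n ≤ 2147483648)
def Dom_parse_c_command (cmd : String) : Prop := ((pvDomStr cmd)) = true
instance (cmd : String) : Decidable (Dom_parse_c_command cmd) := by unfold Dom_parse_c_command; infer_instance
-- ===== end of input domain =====

-- B replaces A's manual enumerate-and-accumulate character loop by two up-front find calls
-- plus slicing (idiomatic; same O(n) cost). Both raise on strings without '=' or ';' — excluded by Pre_.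


-- ===== PORT A =====
-- the enumerate loop: `word` is the accumulated prefix, `rest` the characters still to scan
-- (so cmd[i+1:] is exactly `rest` after the current char); the final `raise ValueError`
-- is outside Pre_ (we return a placeholder there).
def parse_c_command.go : List Char → List Char → Option String × String × Option String
  | [], _ => (none, "", none)            -- raise ValueError (excluded by Pre_)
  | c :: rest, word =>
    if c = ';' then (none, String.mk word, String.mk rest)
    else if c = '=' then (some (String.mk word), String.mk rest, none)
    else parse_c_command.go rest (word ++ [c])

def parse_c_command (cmd : String) : Option String × String × Option String :=
  parse_c_command.go cmd.toList []

-- ===== PORT B =====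
-- Source B: sc = cmd.find(';'); eq = cmd.find('='); pick the earlier delimiter and slice.
def parse_c_command_alt (cmd : String) : Option String × String × Option String :=
  let s := cmd.toList
  let sc := PySem.Chars.find s [';']
  let eq := PySem.Chars.find s ['=']
  if sc ≠ -1 ∧ (eq = -1 ∨ sc < eq) then
    (none, String.mk (PySem.Chars.slice s none (some sc)),
     String.mk (PySem.Chars.slice s (some (sc + 1)) none))
  else if eq ≠ -1 then
    (some (String.mk (PySem.Chars.slice s none (some eq))),
     String.mk (PySem.Chars.slice s (some (eq + 1)) none), none)
  else (none, "", none)                  -- raise ValueError (excluded by Pre_)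

-- ===== PRECONDITION & SPEC =====
-- Pre_ excludes exactly the strings containing neither ';' nor '=': the Python A (and B) raise ValueError there.
def Pre_parse_c_command (cmd : String) : Prop :=
  PySem.Str.isIn ";" cmd = true ∨ PySem.Str.isIn "=" cmd = true
instance (cmd : String) : Decidable (Pre_parse_c_command cmd) := by unfold Pre_parse_c_command; infer_instance
def pvWitness_parse_c_command : String := "D=M+1"

def Spec_parse_c_command (cmd : String) (out : Option String × String × Option String) : Prop := out = parse_c_command_alt cmd
instance (cmd : String) (out : Option String × String × Option String) : Decidable (Spec_parse_c_command cmd out) := by unfold Spec_parse_c_command; infer_instance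

-- ===== CLAIM (what is proved, stated in full; the proofs are below) =====
def Claim_equal_parse_c_command : Prop := ∀ (cmd : String), Dom_parse_c_command cmd → Pre_parse_c_command cmd → Spec_parse_c_command cmd (parse_c_command cmd)

-- ===== LEMMAS AND PROOFS =====

-- one step of Chars.find.go for a single-character needle
theorem findgo_cons (d c : Char) (l : List Char) (i : Nat) :
    PySem.Chars.find.go [d] (c :: l) i = if c = d then (i : Int) else PySem.Chars.find.go [d] l (i + 1) := by
  rw [PySem.Chars.find.go]
  by_cases h : c = d
  · simp [List.isPrefixOf, h]
  · simp [List.isPrefixOf, h]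
    intro h'; exact absurd h'.symm h

theorem findgo_nil (d : Char) (i : Nat) : PySem.Chars.find.go [d] [] i = -1 := by
  rw [PySem.Chars.find.go]; simp [List.isPrefixOf]

-- the index argument of find.go only shifts the result
theorem findgo_shift (d : Char) (l : List Char) (i : Nat) :
    PySem.Chars.find.go [d] l i =
      if PySem.Chars.find.go [d] l 0 = -1 then -1 else PySem.Chars.find.go [d] l 0 + i := by
  induction l generalizing i with
  | nil => simp [findgo_nil]
  | cons c rest ih =>
    rw [findgo_cons, findgo_cons]
    by_cases h : c = d
    · simp [h]
    · simp only [h, if_false]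
      rw [ih (i + 1), ih 1]
      have hge : (-1 : Int) ≤ PySem.Chars.find.go [d] rest 0 := PySem.Chars.neg_one_le_find rest [d]
      by_cases h0 : PySem.Chars.find.go [d] rest 0 = -1
      · simp [h0]
      · have h1 : ¬ (PySem.Chars.find.go [d] rest 0 + 1 = -1) := by omega
        simp [h0, h1]; omega

theorem find_single_cons (d c : Char) (l : List Char) :
    PySem.Chars.find (c :: l) [d] =
      if c = d then 0
      else if PySem.Chars.find l [d] = -1 then -1 else PySem.Chars.find l [d] + 1 := by
  show PySem.Chars.find.go [d] (c :: l) 0 = _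
  rw [findgo_cons, findgo_shift]
  rfl

theorem find_single_nil (d : Char) : PySem.Chars.find ([] : List Char) [d] = -1 := by
  show PySem.Chars.find.go [d] [] 0 = -1
  exact findgo_nil d 0

theorem find_single_ge (d : Char) (l : List Char) : -1 ≤ PySem.Chars.find l [d] :=
  PySem.Chars.neg_one_le_find l [d]

-- B's branch structure, phrased on take/drop with an explicit accumulated prefix
def altGo (l acc : List Char) : Option String × String × Option String :=
  let sc := PySem.Chars.find l [';']
  let eq := PySem.Chars.find l ['=']
  if sc ≠ -1 ∧ (eq = -1 ∨ sc < eq) then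
    (none, String.mk (acc ++ l.take sc.toNat), String.mk (l.drop (sc.toNat + 1)))
  else if eq ≠ -1 then
    (some (String.mk (acc ++ l.take eq.toNat)), String.mk (l.drop (eq.toNat + 1)), none)
  else (none, "", none)

-- the heart of the proof: A's loop computes B's find-and-slice result
theorem go_eq_altGo (l acc : List Char) : parse_c_command.go l acc = altGo l acc := by
  induction l generalizing acc with
  | nil =>
    simp [parse_c_command.go, altGo, find_single_nil]
  | cons c rest ih =>
    by_cases hs : c = ';'
    · simp only [parse_c_command.go, altGo, hs, if_pos rfl, find_single_cons]
      have : (';' : Char) ≠ '=' := by decide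
      simp only [this, if_false, if_pos rfl]
      have h1 : ¬ ((0 : Int) = -1) := by decide
      by_cases he : PySem.Chars.find rest ['='] = -1
      · simp [he, h1]
      · have := find_single_ge '=' rest
        have hlt : (0 : Int) < PySem.Chars.find rest ['='] + 1 := by omega
        simp [he, h1, hlt]
    · by_cases heq : c = '='
      · simp only [parse_c_command.go, altGo, heq, find_single_cons]
        have h2 : ('=' : Char) ≠ ';' := by decide
        simp only [h2, if_false, if_pos rfl, if_neg (show ¬ (('=' : Char) = ';') from h2)]
        have h1 : ¬ ((0 : Int) = -1) := by decide
        by_cases hsc : PySem.Chars.find rest [';'] = -1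
        · simp [hsc, h1]
        · have := find_single_ge ';' rest
          have : ¬ (PySem.Chars.find rest [';'] + 1 < 0) := by omega
          simp [hsc, h1, this]
      · -- ordinary character: shift the accumulator and use the IH
        rw [parse_c_command.go]
        simp only [hs, heq, if_false]
        rw [ih]
        unfold altGo
        rw [find_single_cons, find_single_cons]
        simp only [hs, heq, if_false]
        have hges := find_single_ge ';' rest
        have hgee := find_single_ge '=' rest
        by_cases hsc : PySem.Chars.find rest [';'] = -1 <;>
          by_cases he : PySem.Chars.find rest ['='] = -1
        · simp [hsc, he]
        · have h0e : 0 ≤ PySem.Chars.find rest ['='] := by omega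
          have hne : ¬ (PySem.Chars.find rest ['='] + 1 = -1) := by omega
          have ht : (PySem.Chars.find rest ['='] + 1).toNat = (PySem.Chars.find rest ['=']).toNat + 1 := by omega
          simp [hsc, he, hne, ht, List.take_succ_cons, List.drop_succ_cons]
        · have h0s : 0 ≤ PySem.Chars.find rest [';'] := by omega
          have hne : ¬ (PySem.Chars.find rest [';'] + 1 = -1) := by omega
          have ht : (PySem.Chars.find rest [';'] + 1).toNat = (PySem.Chars.find rest [';']).toNat + 1 := by omega
          simp [hsc, he, hne, ht, List.take_succ_cons, List.drop_succ_cons]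
        · have h0s : 0 ≤ PySem.Chars.find rest [';'] := by omega
          have h0e : 0 ≤ PySem.Chars.find rest ['='] := by omega
          have hts : (PySem.Chars.find rest [';'] + 1).toNat = (PySem.Chars.find rest [';']).toNat + 1 := by omega
          have hte : (PySem.Chars.find rest ['='] + 1).toNat = (PySem.Chars.find rest ['=']).toNat + 1 := by omega
          have hnes : ¬ (PySem.Chars.find rest [';'] + 1 = -1) := by omega
          have hnee : ¬ (PySem.Chars.find rest ['='] + 1 = -1) := by omega
          have hlt : (PySem.Chars.find rest [';'] + 1 < PySem.Chars.find rest ['='] + 1) ↔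
              (PySem.Chars.find rest [';'] < PySem.Chars.find rest ['=']) := by omega
          by_cases hord : PySem.Chars.find rest [';'] < PySem.Chars.find rest ['=']
          · simp [hsc, he, hnes, hnee, hord, hlt, hts, hte, List.take_succ_cons, List.drop_succ_cons]
          · simp [hsc, he, hnes, hnee, hord, hlt, hts, hte, List.take_succ_cons, List.drop_succ_cons]

-- B's port unfolds to altGo with empty prefix
theorem alt_eq_altGo (cmd : String) : parse_c_command_alt cmd = altGo cmd.toList [] := by
  unfold parse_c_command_alt altGo
  have hs := find_single_ge ';' cmd.toList
  have he := find_single_ge '=' cmd.toList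
  by_cases h1 : PySem.Chars.find cmd.toList [';'] ≠ -1 ∧
      (PySem.Chars.find cmd.toList ['='] = -1 ∨
        PySem.Chars.find cmd.toList [';'] < PySem.Chars.find cmd.toList ['=']) 
  · have h0 : 0 ≤ PySem.Chars.find cmd.toList [';'] := by omega
    have h0' : 0 ≤ PySem.Chars.find cmd.toList [';'] + 1 := by omega
    have ht : (PySem.Chars.find cmd.toList [';'] + 1).toNat = (PySem.Chars.find cmd.toList [';']).toNat + 1 := by omega
    simp [h1, PySem.Chars.slice_eq_listSlice, PySem.List.slice_to cmd.toList h0, PySem.List.slice_from cmd.toList h0', ht]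
  · by_cases h2 : PySem.Chars.find cmd.toList ['='] ≠ -1
    · have h0 : 0 ≤ PySem.Chars.find cmd.toList ['='] := by omega
      have h0' : 0 ≤ PySem.Chars.find cmd.toList ['='] + 1 := by omega
      have ht : (PySem.Chars.find cmd.toList ['='] + 1).toNat = (PySem.Chars.find cmd.toList ['=']).toNat + 1 := by omega
      have hc : ¬ (¬ PySem.Chars.find cmd.toList [';'] = -1 ∧
          PySem.Chars.find cmd.toList [';'] < PySem.Chars.find cmd.toList ['=']) := by tauto
      simp [hc, h2, PySem.Chars.slice_eq_listSlice, PySem.List.slice_to cmd.toList h0, PySem.List.slice_from cmd.toList h0', ht]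
    · simp [h1, h2]

-- ===== VERDICT (by name: the statement is the Claim_ definition above) =====
theorem parse_c_command_spec : Claim_equal_parse_c_command := by
  intro cmd _ _
  show parse_c_command cmd = parse_c_command_alt cmd
  rw [parse_c_command, go_eq_altGo, alt_eq_altGo]
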